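-- pv_equiv track=rewrite | github.com/hisorhikaneko92-create/itsai-detection | scripts/predict_document.py | _first_subtoken_per_word
-- ===== SOURCE A (Python) =====
-- from typing import Dict, List, Optional, Tuple
--
-- def _first_subtoken_per_word(
--                              token_path: List[int],
--                              word_ids: List[Optional[int]],
--                              n_words: int) -> List[int]:
--     """Map a single-window token path to word-level predictions
--     using the first-sub-token rule (validator-aligned)."""
--     word_preds = [0] * n_words
--     word_assigned = [False] * n_words
--     for i, wid in enumerate(word_ids):
--         if i >= len(token_path):
--             break
--         if wid is None or word_assigned[wid]:
--             continue
--         word_preds[wid] = token_path[i]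
--         word_assigned[wid] = True
--     return word_preds
-- ===== SOURCE B (Python) =====
-- def _first_subtoken_per_word(token_path, word_ids, n_words):
--     """Same mapping, no bookkeeping array: walk the usable prefix in
--     reverse and write unconditionally; the last surviving write for each
--     word is its smallest token index, i.e. the first-sub-token rule."""
--     word_preds = [0] * n_words
--     m = min(len(word_ids), len(token_path))
--     for i in reversed(range(m)):
--         wid = word_ids[i]
--         if wid is not None:
--             word_preds[wid] = token_path[i]
--     return word_preds
-- ===== Notes on version B (the rewrite author's own statement) =====
-- stated objective: simpler
-- what changed: Drops the word_assigned boolean array and the skip logic: a single reverse pass over the usable prefix writes each word's prediction unconditionally, so the smallest-index (first-subtoken) write survives.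
import Mathlib
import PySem

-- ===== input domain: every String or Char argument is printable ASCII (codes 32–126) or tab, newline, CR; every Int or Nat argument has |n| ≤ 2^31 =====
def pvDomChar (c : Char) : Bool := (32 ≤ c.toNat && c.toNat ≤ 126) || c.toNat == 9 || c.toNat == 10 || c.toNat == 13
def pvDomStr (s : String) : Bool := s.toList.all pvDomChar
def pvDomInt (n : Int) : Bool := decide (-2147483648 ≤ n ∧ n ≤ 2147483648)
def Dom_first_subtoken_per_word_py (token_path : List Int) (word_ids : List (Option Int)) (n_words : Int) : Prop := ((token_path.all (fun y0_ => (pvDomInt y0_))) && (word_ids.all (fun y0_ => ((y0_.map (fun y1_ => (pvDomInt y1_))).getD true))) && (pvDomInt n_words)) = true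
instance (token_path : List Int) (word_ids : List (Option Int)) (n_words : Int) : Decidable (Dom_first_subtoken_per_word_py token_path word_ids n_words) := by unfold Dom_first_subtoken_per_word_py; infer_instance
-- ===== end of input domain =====

-- B drops A's word_assigned bookkeeping array: one reverse pass with unconditional writes
-- realises the first-subtoken rule (equality of RETURN values is what is proved).

-- ===== PORT A =====
-- the for-loop over enumerate(word_ids): `i >= len(token_path): break` means the loop
-- consumes word_ids and token_path in lockstep; `word_preds[wid]` / `word_assigned[wid]`
-- use Python indexing (negative wid counts from the end) via pySetD/pyGetD, exact under
-- Pre_ (out-of-range wid raises IndexError in Python and is excluded by Pre_).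
def fstpA_go : List (Option Int) → List Int → List Int → List Bool → List Int
  | [], _, preds, _ => preds
  | _ :: _, [], preds, _ => preds              -- i >= len(token_path): break
  | wid :: ws, t :: ts, preds, assigned =>
    match wid with
    | none => fstpA_go ws ts preds assigned    -- continue
    | some w =>
      if PySem.List.pyGetD assigned w false then fstpA_go ws ts preds assigned  -- continue
      else fstpA_go ws ts (PySem.List.pySetD preds w t) (PySem.List.pySetD assigned w true)

def first_subtoken_per_word_py (token_path : List Int) (word_ids : List (Option Int)) (n_words : Int) : List Int :=
  fstpA_go word_ids token_path (List.replicate n_words.toNat 0) (List.replicate n_words.toNat false)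

-- ===== PORT B =====
-- body of B's reversed loop: wid = word_ids[i]; if wid is not None: word_preds[wid] = token_path[i]
def fstpB_step (token_path : List Int) (word_ids : List (Option Int)) (preds : List Int) (i : Nat) : List Int :=
  match PySem.List.pyGetD word_ids (i : Int) none with
  | none => preds
  | some w => PySem.List.pySetD preds w (PySem.List.pyGetD token_path (i : Int) 0)

def first_subtoken_per_word_py_alt (token_path : List Int) (word_ids : List (Option Int)) (n_words : Int) : List Int :=
  let m := min word_ids.length token_path.length
  ((List.range m).reverse).foldl (fun q i => fstpB_step token_path word_ids q i) (List.replicate n_words.toNat 0)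

-- ===== PRECONDITION & SPEC =====
-- Pre_ excludes exactly the inputs on which A raises IndexError: a non-None word id in the
-- zipped prefix that is outside Python's index range [-n_words, n_words) of the two arrays.
def Pre_first_subtoken_per_word_py (token_path : List Int) (word_ids : List (Option Int)) (n_words : Int) : Prop :=
  ∀ pr ∈ word_ids.zip token_path, ∀ w : Int, pr.1 = some w → -n_words ≤ w ∧ w < n_words
instance (token_path : List Int) (word_ids : List (Option Int)) (n_words : Int) : Decidable (Pre_first_subtoken_per_word_py token_path word_ids n_words) := by unfold Pre_first_subtoken_per_word_py; infer_instance

def pvWitness_first_subtoken_per_word_py : List Int × List (Option Int) × Int :=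
  ([5, 7, 9], [some 1, none, some 1], 3)

def Spec_first_subtoken_per_word_py (token_path : List Int) (word_ids : List (Option Int)) (n_words : Int) (out : List Int) : Prop := out = first_subtoken_per_word_py_alt token_path word_ids n_words
instance (token_path : List Int) (word_ids : List (Option Int)) (n_words : Int) (out : List Int) : Decidable (Spec_first_subtoken_per_word_py token_path word_ids n_words out) := by unfold Spec_first_subtoken_per_word_py; infer_instance

-- ===== CLAIM (what is proved, stated in full; the proofs are below) =====
def Claim_equal_first_subtoken_per_word_py : Prop := ∀ (token_path : List Int) (word_ids : List (Option Int)) (n_words : Int), Dom_first_subtoken_per_word_py token_path word_ids n_words → Pre_first_subtoken_per_word_py token_path word_ids n_words → Spec_first_subtoken_per_word_py token_path word_ids n_words (first_subtoken_per_word_py token_path word_ids n_words)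

-- ===== LEMMAS AND PROOFS =====

-- resolved (non-negative) slot of a Python index w in a list of length n
def pvSlot (n : Nat) (w : Int) : Nat := (PySem.List.pyIdx? n w).getD 0

lemma pvSlot_lt {n : Nat} {w : Int} (h1 : -(n : Int) ≤ w) (h2 : w < n) : pvSlot n w < n := by
  unfold pvSlot PySem.List.pyIdx?
  split_ifs <;> (simp_all; try omega)

lemma pyIdx?_inRange {n : Nat} {w : Int} (h1 : -(n : Int) ≤ w) (h2 : w < n) :
    PySem.List.pyIdx? n w = some (pvSlot n w) := by
  unfold pvSlot PySem.List.pyIdx?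
  split_ifs <;> simp_all

lemma pySetD_inRange {α : Type} (xs : List α) (w : Int) (v : α)
    (h1 : -(xs.length : Int) ≤ w) (h2 : w < xs.length) :
    PySem.List.pySetD xs w v = xs.set (pvSlot xs.length w) v := by
  simp [PySem.List.pySetD, PySem.List.pySet?, pyIdx?_inRange h1 h2]

lemma pyGetD_inRange {α : Type} (xs : List α) (w : Int) (d : α)
    (h1 : -(xs.length : Int) ≤ w) (h2 : w < xs.length) :
    PySem.List.pyGetD xs w d = (xs[pvSlot xs.length w]?).getD d := by
  simp [PySem.List.pyGetD, PySem.List.pyGet?, pyIdx?_inRange h1 h2]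

-- list of (token, resolved slot) pairs for the effective prefix, in forward order
def pvPairs (n : Nat) : List (Option Int) → List Int → List (Int × Nat)
  | [], _ => []
  | _ :: _, [] => []
  | none :: ws, _ :: ts => pvPairs n ws ts
  | some w :: ws, t :: ts => (t, pvSlot n w) :: pvPairs n ws ts

-- reverse (foldr) writes, guarded by the flags a / unguarded
def pvRg (a : List Bool) (p : List Int) (P : List (Int × Nat)) : List Int :=
  P.foldr (fun tj q => if (a[tj.2]?).getD false then q else q.set tj.2 tj.1) p

def pvRw (p : List Int) (P : List (Int × Nat)) : List Int :=
  P.foldr (fun tj q => q.set tj.2 tj.1) p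

lemma pvRw_length (p : List Int) (P : List (Int × Nat)) : (pvRw p P).length = p.length := by
  induction P with
  | nil => rfl
  | cons tj P ih => simp [pvRw] at *; omega

lemma pvRw_cons (p : List Int) (tj : Int × Nat) (P : List (Int × Nat)) :
    pvRw p (tj :: P) = (pvRw p P).set tj.2 tj.1 := rfl

lemma pvRg_cons (a : List Bool) (p : List Int) (tj : Int × Nat) (P : List (Int × Nat)) :
    pvRg a p (tj :: P) =
      if (a[tj.2]?).getD false then pvRg a p P else (pvRg a p P).set tj.2 tj.1 := rfl

lemma pvRg_set (P : List (Int × Nat)) (a : List Bool) (p : List Int) (j : Nat) (t : Int)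
    (hj : j < a.length) :
    pvRg (a.set j true) (p.set j t) P = (pvRg a p P).set j t := by
  induction P with
  | nil => rfl
  | cons tj P ih =>
    obtain ⟨t', j'⟩ := tj
    rw [pvRg_cons, pvRg_cons]
    by_cases hjj : j' = j
    · subst hjj
      have hgt : (((a.set j' true)[j']?).getD false) = true := by
        simp [hj]
      rw [hgt, if_pos rfl, ih]
      by_cases hg : (a[j']?).getD false = true
      · rw [if_pos hg]
      · rw [if_neg hg, List.set_set]
    · have hgt : ((a.set j true)[j']?) = a[j']? :=
        List.getElem?_set_ne (by omega)
      rw [hgt]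
      by_cases hg : (a[j']?).getD false = true
      · rw [if_pos hg, if_pos hg, ih]
      · rw [if_neg hg, if_neg hg, ih, List.set_comm _ _ (by omega : j' ≠ j)]

lemma pvRg_replicate_false (k : Nat) (p : List Int) (P : List (Int × Nat)) :
    pvRg (List.replicate k false) p P = pvRw p P := by
  induction P with
  | nil => rfl
  | cons tj P ih =>
    rw [pvRg_cons, pvRw_cons, ih]
    have : (((List.replicate k false)[tj.2]?).getD false) = false := by
      simp [List.getElem?_replicate]
      split_ifs <;> simp
    rw [this]
    simp

-- A-side bridge: the forward flagged loop equals the guarded reverse writes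
lemma fstpA_go_eq (ws : List (Option Int)) :
    ∀ (ts : List Int) (p : List Int) (a : List Bool), p.length = a.length →
    (∀ pr ∈ ws.zip ts, ∀ w : Int, pr.1 = some w → -(a.length : Int) ≤ w ∧ w < a.length) →
    fstpA_go ws ts p a = pvRg a p (pvPairs a.length ws ts) := by
  induction ws with
  | nil => intro ts p a _ _; cases ts <;> rfl
  | cons wid ws ih =>
    intro ts p a hlen hOk
    cases ts with
    | nil => rfl
    | cons t ts =>
      cases wid with
      | none =>
        simp only [fstpA_go, pvPairs]
        exact ih ts p a hlen (fun pr hpr => hOk pr (by simp [hpr]))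
      | some w =>
        have hw : -(a.length : Int) ≤ w ∧ w < a.length := hOk (some w, t) (by simp) w rfl
        have hOk' : ∀ pr ∈ ws.zip ts, ∀ w' : Int, pr.1 = some w' → -(a.length : Int) ≤ w' ∧ w' < a.length :=
          fun pr hpr => hOk pr (by simp [hpr])
        simp only [fstpA_go, pvPairs]
        rw [pyGetD_inRange a w false hw.1 hw.2, pvRg_cons]
        by_cases hg : (a[pvSlot a.length w]?).getD false = true
        · rw [if_pos hg, if_pos hg]
          exact ih ts p a hlen hOk'
        · rw [if_neg hg, if_neg hg]
          rw [pySetD_inRange p w t (by omega) (by omega), pySetD_inRange a w true hw.1 hw.2]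
          have hsl : pvSlot p.length w = pvSlot a.length w := by rw [hlen]
          rw [hsl]
          have hla : (a.set (pvSlot a.length w) true).length = a.length := by simp
          rw [ih ts (p.set (pvSlot a.length w) t) (a.set (pvSlot a.length w) true)
              (by simp [hlen]) (by rw [hla]; exact hOk')]
          rw [hla]
          exact pvRg_set _ _ _ _ _ (pvSlot_lt hw.1 hw.2)

-- B-side bridge: the reverse loop over range(min …) equals the unguarded reverse writes
lemma fstpB_eq (ws : List (Option Int)) :
    ∀ (ts : List Int) (p : List Int),
    (∀ pr ∈ ws.zip ts, ∀ w : Int, pr.1 = some w → -(p.length : Int) ≤ w ∧ w < p.length) →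
    (List.range (min ws.length ts.length)).foldr (fun i q => fstpB_step ts ws q i) p
      = pvRw p (pvPairs p.length ws ts) := by
  induction ws with
  | nil => intro ts p _; cases ts <;> rfl
  | cons wid ws ih =>
    intro ts p hOk
    cases ts with
    | nil => rfl
    | cons t ts =>
      have hmin : min (wid :: ws).length (t :: ts).length = (min ws.length ts.length) + 1 := by
        simp [Nat.succ_min_succ]
      rw [hmin, List.range_succ_eq_map, List.foldr_cons, List.foldr_map]
      have hbody : (fun (x : Nat) (y : List Int) => fstpB_step (t :: ts) (wid :: ws) y x.succ)
          = (fun (i : Nat) (q : List Int) => fstpB_step ts ws q i) := by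
        funext i q
        have h1 : PySem.List.pyGetD (wid :: ws) ((i.succ : Nat) : Int) none
            = PySem.List.pyGetD ws ((i : Nat) : Int) none := by
          rw [PySem.List.pyGetD_natCast, PySem.List.pyGetD_natCast, List.getD_cons_succ]
        have h2 : PySem.List.pyGetD (t :: ts) ((i.succ : Nat) : Int) 0
            = PySem.List.pyGetD ts ((i : Nat) : Int) 0 := by
          rw [PySem.List.pyGetD_natCast, PySem.List.pyGetD_natCast, List.getD_cons_succ]
        simp only [fstpB_step, h1, h2]
      rw [hbody, ih ts p (fun pr hpr => hOk pr (by simp [hpr]))]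
      cases wid with
      | none =>
        have : fstpB_step (t :: ts) (none :: ws) (pvRw p (pvPairs p.length ws ts)) 0
            = pvRw p (pvPairs p.length ws ts) := by
          simp [fstpB_step]
        rw [this]; rfl
      | some w =>
        have hw : -(p.length : Int) ≤ w ∧ w < p.length := hOk (some w, t) (by simp) w rfl
        have hq : fstpB_step (t :: ts) (some w :: ws) (pvRw p (pvPairs p.length ws ts)) 0
            = PySem.List.pySetD (pvRw p (pvPairs p.length ws ts)) w t := by
          simp [fstpB_step]
        rw [hq]
        have hlen : (pvRw p (pvPairs p.length ws ts)).length = p.length := pvRw_length _ _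
        rw [pySetD_inRange _ w t (by omega) (by omega), hlen]
        rfl

-- ===== VERDICT (by name: the statement is the Claim_ definition above) =====
theorem first_subtoken_per_word_py_spec : Claim_equal_first_subtoken_per_word_py := by
  intro token_path word_ids n_words _ hPre
  unfold Spec_first_subtoken_per_word_py first_subtoken_per_word_py first_subtoken_per_word_py_alt
  have hOk : ∀ pr ∈ word_ids.zip token_path, ∀ w : Int,
      pr.1 = some w → -((n_words.toNat : Nat) : Int) ≤ w ∧ w < (n_words.toNat : Nat) := by
    intro pr hpr w hw
    have := hPre pr hpr w hw
    omega
  have ha : (List.replicate n_words.toNat (false : Bool)).length = n_words.toNat := by simp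
  have hp : (List.replicate n_words.toNat (0 : Int)).length = n_words.toNat := by simp
  rw [fstpA_go_eq word_ids token_path _ _ (by simp) (by rw [ha]; exact hOk)]
  rw [List.foldl_reverse]
  rw [fstpB_eq word_ids token_path _ (by rw [hp]; exact hOk)]
  rw [ha, hp, pvRg_replicate_false]
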